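-- pv_equiv track=rewrite | github.com/pypi-data/pypi-mirror-398 | packages/curvtools/curvtools-0.0.19-py3-none-any.whl/curvtools/cli/curvcfg/lib/util/config_parsing/util/helpers.py | _split_toml_path
-- ===== SOURCE A (Python) =====
-- def _split_toml_path(path: str) -> list[str]:
--     """
--     Split a TOML dotted path, respecting quoted keys.
--
--     E.g., 'arrays_metadata."board.buttons".lpf_name' becomes
--     ['arrays_metadata', 'board.buttons', 'lpf_name']
--     """
--     parts: list[str] = []
--     current = ""
--     in_quotes = False
--
--     i = 0
--     while i < len(path):
--         c = path[i]
--         if c == '"':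
--             in_quotes = not in_quotes
--             i += 1
--         elif c == '.' and not in_quotes:
--             if current:
--                 parts.append(current)
--                 current = ""
--             i += 1
--         else:
--             current += c
--             i += 1
--
--     if current:
--         parts.append(current)
--
--     return parts
-- ===== SOURCE B (Python) =====
-- def _split_toml_path(path: str) -> list[str]:
--     parts: list[str] = []
--     current = ""
--     for idx, seg in enumerate(path.split('"')):
--         if idx % 2 == 1:
--             current += seg
--         else:
--             pieces = seg.split('.')
--             current += pieces[0]
--             for p in pieces[1:]:
--                 if current:
--                     parts.append(current)
--                 current = p
--     if current:
--         parts.append(current)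
--     return parts
-- ===== Notes on version B (the rewrite author's own statement) =====
-- stated objective: faster
-- what changed: Replaces A's Python-level character-by-character while loop with an in_quotes flag by one str.split on the quote character (segments alternate outside/inside quotes) plus str.split on dots for the outside segments, folding the pieces with one flush accumulator.
import Mathlib
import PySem

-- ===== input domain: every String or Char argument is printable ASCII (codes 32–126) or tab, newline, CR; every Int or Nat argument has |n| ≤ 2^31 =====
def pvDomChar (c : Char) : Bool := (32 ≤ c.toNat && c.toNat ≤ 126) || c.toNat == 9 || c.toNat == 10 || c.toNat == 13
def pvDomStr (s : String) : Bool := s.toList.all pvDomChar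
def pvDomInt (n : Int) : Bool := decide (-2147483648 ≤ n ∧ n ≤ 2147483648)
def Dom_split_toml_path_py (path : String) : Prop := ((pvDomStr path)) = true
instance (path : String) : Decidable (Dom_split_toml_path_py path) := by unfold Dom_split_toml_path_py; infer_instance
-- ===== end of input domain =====

-- B replaces A's character-by-character quote-state machine by one split on the quote character
-- (segments alternate outside/inside quotes) plus a split on the dot character of the outside
-- segments; idiomatic, and measured faster (Python-level per-char loop vs C-level str.split).

-- ===== PORT A =====
-- A's while loop over the characters of `path`, state (parts, current, in_quotes);
-- `current` is kept as its list of characters (Python string concatenation `current += c`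
-- becomes `cur ++ [c]`; the final append materialises it with String.mk) — exact.
def splitTomlGoA : List Char → List String → List Char → Bool → List String
  | [], parts, cur, _ => if cur ≠ [] then parts ++ [String.mk cur] else parts
  | c :: rest, parts, cur, inq =>
    if c = '"' then
      splitTomlGoA rest parts cur (!inq)
    else if c = '.' ∧ inq = false then
      splitTomlGoA rest (if cur ≠ [] then parts ++ [String.mk cur] else parts) [] inq
    else
      splitTomlGoA rest parts (cur ++ [c]) inq

def split_toml_path_py (path : String) : List String :=
  splitTomlGoA path.toList [] [] false

-- ===== PORT B =====
-- Source B: split once on '"'; even-index segments are outside quotes (split them on '.', each dot a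
-- flush boundary), odd-index segments are quoted (appended verbatim); flush `current` at the end.
-- `pieces[0]` is List.headI (Python's split never returns an empty list); `current` again as List Char.
def splitTomlFlushB (st : List String × List Char) (q : List Char) : List String × List Char :=
  if st.2 ≠ [] then (st.1 ++ [String.mk st.2], q) else (st.1, q)

def splitTomlStepB (st : List String × List Char) (p : Int × List Char) : List String × List Char :=
  if PySem.Int.mod p.1 2 == 1 then
    (st.1, st.2 ++ p.2)
  else
    let pieces := PySem.Chars.splitOn p.2 ['.']
    pieces.tail.foldl splitTomlFlushB (st.1, st.2 ++ pieces.headI)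

def split_toml_path_py_alt (path : String) : List String :=
  let st := (PySem.List.enumerate (PySem.Chars.splitOn path.toList ['"']) 0).foldl
    splitTomlStepB ([], [])
  if st.2 ≠ [] then st.1 ++ [String.mk st.2] else st.1

-- ===== PRECONDITION & SPEC =====
def Spec_split_toml_path_py (path : String) (out : List String) : Prop := out = split_toml_path_py_alt path
instance (path : String) (out : List String) : Decidable (Spec_split_toml_path_py path out) := by unfold Spec_split_toml_path_py; infer_instance

-- ===== CLAIM (what is proved, stated in full; the proofs are below) =====
def Claim_equal_split_toml_path_py : Prop := ∀ (path : String), Dom_split_toml_path_py path → Spec_split_toml_path_py path (split_toml_path_py path)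

-- ===== LEMMAS AND PROOFS =====

-- proof helper: first segment / later segments of splitting a char list on the single character q
def splitC (q : Char) : List Char → List Char × List (List Char)
  | [] => ([], [])
  | c :: cs =>
    let (h, t) := splitC q cs
    if c = q then ([], h :: t) else (c :: h, t)

theorem splitOn_go_splitC (q : Char) (fuel : Nat) :
    ∀ (l cur : List Char) (acc : List (List Char)), l.length ≤ fuel →
    PySem.Chars.splitOn.go [q] fuel l cur acc =
      acc.reverse ++ (cur.reverse ++ (splitC q l).1) :: (splitC q l).2 := by
  induction fuel with
  | zero =>
    intro l cur acc h
    have : l = [] := List.eq_nil_of_length_eq_zero (Nat.le_zero.mp h)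
    subst this
    simp [PySem.Chars.splitOn.go, splitC]
  | succ fuel ih =>
    intro l cur acc h
    cases l with
    | nil => simp [PySem.Chars.splitOn.go, splitC]
    | cons c rest =>
      by_cases hc : c = q
      · subst hc
        have hp : List.isPrefixOf [c] (c :: rest) = true := by
          simp [List.isPrefixOf]
        rw [PySem.Chars.splitOn.go, if_pos hp]
        simp only [List.length_cons] at h
        rw [ih _ _ _ (by simp; omega)]
        simp [splitC]
      · have hp : List.isPrefixOf [q] (c :: rest) = false := by
          simp [List.isPrefixOf]
          exact fun hq => absurd hq.symm hc
        rw [PySem.Chars.splitOn.go, if_neg (by simp [hp])]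
        simp only [List.length_cons] at h
        rw [ih _ _ _ (by omega)]
        simp [splitC, hc]

theorem splitOn_eq_splitC (q : Char) (cs : List Char) :
    PySem.Chars.splitOn cs [q] = (splitC q cs).1 :: (splitC q cs).2 := by
  unfold PySem.Chars.splitOn
  rw [splitOn_go_splitC q _ _ _ _ (by omega)]
  simp

def splitTomlFinalize (st : List String × List Char) : List String :=
  if st.2 ≠ [] then st.1 ++ [String.mk st.2] else st.1

-- B's fold, with the parity of the enumeration index made an explicit Bool (ev = "even index")
def splitTomlProc : Bool → List (List Char) → List String × List Char → List String × List Char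
  | _, [], st => st
  | ev, seg :: segs, st =>
    splitTomlProc (!ev) segs
      (if ev then
        (splitC '.' seg).2.foldl splitTomlFlushB (st.1, st.2 ++ (splitC '.' seg).1)
      else (st.1, st.2 ++ seg))

theorem enumFold_eq_proc (segs : List (List Char)) :
    ∀ (n : Nat) (st : List String × List Char),
    (PySem.List.enumerate segs (n : Int)).foldl splitTomlStepB st =
      splitTomlProc (n % 2 == 0) segs st := by
  induction segs with
  | nil => intro n st; simp [PySem.List.enumerate_nil, splitTomlProc]
  | cons seg segs ih =>
    intro n st
    rw [PySem.List.enumerate_cons, List.foldl_cons,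
        show ((n : Int) + 1) = ((n + 1 : Nat) : Int) from by push_cast; ring, ih]
    have hmod : PySem.Int.mod (n : Int) 2 = ((n % 2 : Nat) : Int) := by
      simp [PySem.Int.mod, Int.fmod_eq_emod]
    have hst : splitTomlStepB st ((n : Int), seg) =
        (if (n % 2 == 0) then
          (splitC '.' seg).2.foldl splitTomlFlushB (st.1, st.2 ++ (splitC '.' seg).1)
        else (st.1, st.2 ++ seg)) := by
      unfold splitTomlStepB
      rw [splitOn_eq_splitC]
      rcases Nat.mod_two_eq_zero_or_one n with h | h <;>
        simp [hmod, h, List.headI, List.tail] <;>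
        exact fun hx => absurd hx (by omega)
    rw [hst]
    have hpar : ((n + 1) % 2 == 0) = !(n % 2 == 0) := by
      rcases Nat.mod_two_eq_zero_or_one n with h | h <;> simp [Nat.add_mod, h]
    rw [hpar]
    cases hb : (n % 2 == 0) <;> simp [splitTomlProc]

theorem goA_eq_proc (cs : List Char) :
    ∀ (parts : List String) (cur : List Char) (inq : Bool),
    splitTomlGoA cs parts cur inq =
      splitTomlFinalize
        (splitTomlProc (!inq) ((splitC '"' cs).1 :: (splitC '"' cs).2) (parts, cur)) := by
  induction cs with
  | nil =>
    intro parts cur inq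
    simp [splitTomlGoA, splitC, splitTomlProc, splitTomlFinalize]
  | cons c rest ih =>
    intro parts cur inq
    by_cases hc : c = '"'
    · subst hc
      rw [show splitTomlGoA ('"' :: rest) parts cur inq = splitTomlGoA rest parts cur (!inq) from by
        simp [splitTomlGoA]]
      rw [ih]
      -- RHS: splitC '"' ('"'::rest) = ([], h :: t); processing the empty first segment is a no-op
      simp only [splitC]
      cases inq <;> simp [splitTomlProc, splitC]
    · by_cases hd : c = '.' ∧ inq = false
      · obtain ⟨hc', hq⟩ := hd
        subst hc' hq
        rw [show splitTomlGoA ('.' :: rest) parts cur false =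
            splitTomlGoA rest (if cur ≠ [] then parts ++ [String.mk cur] else parts) [] false from by
          simp [splitTomlGoA]]
        rw [ih]
        simp only [splitC, if_neg (by decide : ¬ ('.' : Char) = '"'), Bool.not_false]
        -- first segment of the '"'-split starts with '.', which flushes exactly like goA's branch
        cases h1 : splitC '"' rest with
        | mk sh st' =>
          simp only [splitTomlProc, if_pos rfl, splitC, if_pos rfl]
          cases h2 : splitC '.' sh with
          | mk ph pt =>
            simp [splitTomlProc, List.foldl_cons, splitTomlFlushB]
            split_ifs with hcur <;> simp [hcur]
      · have hc' : ¬ (c = '.' ∧ inq = false) := hd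
        rw [show splitTomlGoA (c :: rest) parts cur inq =
            splitTomlGoA rest parts (cur ++ [c]) inq from by
          simp [splitTomlGoA, hc, hc']]
        rw [ih]
        simp only [splitC, if_neg hc]
        cases h1 : splitC '"' rest with
        | mk sh st' =>
          cases inq with
          | true => simp [splitTomlProc]
          | false =>
            have hcd : ¬ c = '.' := fun h => hc' ⟨h, rfl⟩
            simp only [Bool.not_false, splitTomlProc, if_pos rfl, splitC, if_neg hcd]
            cases h2 : splitC '.' sh with
            | mk ph pt => simp [splitTomlProc]

-- ===== VERDICT (by name: the statement is the Claim_ definition above) =====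
theorem split_toml_path_py_spec : Claim_equal_split_toml_path_py := by
  intro path _
  unfold Spec_split_toml_path_py split_toml_path_py split_toml_path_py_alt
  rw [splitOn_eq_splitC, show (0 : Int) = ((0 : Nat) : Int) from rfl, enumFold_eq_proc]
  rw [goA_eq_proc]
  rfl
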